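-- pv_equiv track=rewrite | github.com/thantrieu/Python2030 | net/braniumacademy/ex_chapter6/lesson64/ex28/Exercises28.py | draw_rect
-- ===== SOURCE A (Python) =====
-- def draw_rect(edge):
--     """Hàm vẽ và trả về hình chữ nhật rỗng bằng các dấu *"""
--     rect = []
--     for x in range(1, edge + 1):
--         rect.append([])
--         for y in range(1, edge + 1):
--             if x == 1 or x == edge or y == 1 or y == edge or x == y or x + y == edge + 1:
--                 rect[x - 1].append(' * ')
--             else:
--                 rect[x - 1].append('   ')
--     return rect
-- ===== SOURCE B (Python) =====
-- def draw_rect(edge):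
--     """Row-wise fill-then-stamp: border rows are full star rows; each interior
--     row starts blank and gets exactly four cells stamped."""
--     rect = []
--     for x in range(edge):
--         if x == 0 or x == edge - 1:
--             row = [' * '] * edge
--         else:
--             row = ['   '] * edge
--             row[0] = ' * '
--             row[x] = ' * '
--             row[edge - 1 - x] = ' * '
--             row[edge - 1] = ' * '
--         rect.append(row)
--     return rect
-- ===== Notes on version B (the rewrite author's own statement) =====
-- stated objective: alternative
-- what changed: A tests a six-way boolean condition for every cell of the edge x edge grid; B builds each row directly: border rows as full star rows, interior rows as a blank row with exactly four cells stamped (left/right border and the two diagonal positions).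
import Mathlib
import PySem

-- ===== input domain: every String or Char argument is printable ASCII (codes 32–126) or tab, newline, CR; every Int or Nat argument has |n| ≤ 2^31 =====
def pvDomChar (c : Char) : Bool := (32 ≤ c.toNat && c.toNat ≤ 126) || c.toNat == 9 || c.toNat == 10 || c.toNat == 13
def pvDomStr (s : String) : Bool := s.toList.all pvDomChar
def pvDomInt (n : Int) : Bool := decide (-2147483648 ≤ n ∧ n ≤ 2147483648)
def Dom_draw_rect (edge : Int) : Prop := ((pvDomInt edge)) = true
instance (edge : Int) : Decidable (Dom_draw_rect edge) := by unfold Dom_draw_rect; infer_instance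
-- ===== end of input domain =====

-- B replaces A's per-cell six-way boolean test with a row-wise build (full border rows; blank interior rows with four stamped cells); same cost, alternative decomposition.

-- ===== PORT A =====
-- per-cell test over nested range loops, cells appended one by one
def draw_rect (edge : Int) : List (List String) :=
  (PySem.List.pyRange 1 (edge + 1) 1).foldl (fun rect x =>
    rect ++ [(PySem.List.pyRange 1 (edge + 1) 1).foldl (fun row y =>
      row ++ [if x = 1 ∨ x = edge ∨ y = 1 ∨ y = edge ∨ x = y ∨ x + y = edge + 1
              then " * " else "   "]) []]) []

-- ===== PORT B =====
-- border rows are full star rows; an interior row is a blank row with cells 0, x, edge-1-x, edge-1 stamped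
def draw_rect_alt (edge : Int) : List (List String) :=
  (PySem.List.pyRange 0 edge 1).foldl (fun rect x =>
    rect ++ [if x = 0 ∨ x = edge - 1 then
        List.replicate edge.toNat " * "
      else
        PySem.List.pySetD (PySem.List.pySetD (PySem.List.pySetD (PySem.List.pySetD
          (List.replicate edge.toNat "   ") 0 " * ") x " * ") (edge - 1 - x) " * ") (edge - 1) " * "]) []

-- ===== PRECONDITION & SPEC =====
def Spec_draw_rect (edge : Int) (out : List (List String)) : Prop := out = draw_rect_alt edge
instance (edge : Int) (out : List (List String)) : Decidable (Spec_draw_rect edge out) := by unfold Spec_draw_rect; infer_instance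

-- ===== CLAIM (what is proved, stated in full; the proofs are below) =====
def Claim_equal_draw_rect : Prop := ∀ (edge : Int), Dom_draw_rect edge → Spec_draw_rect edge (draw_rect edge)

-- ===== LEMMAS AND PROOFS =====

-- Both ports build row x (0-based) as a List.range map; rows agree cell by cell:
-- border/diagonal cells via the six-way test on the A side, replicate/set on the B side.
theorem pv_main (edge : Int) : draw_rect edge = draw_rect_alt edge := by
  unfold draw_rect draw_rect_alt
  simp only [PySem.List.foldl_append_singleton_eq_map, List.nil_append]
  rw [PySem.List.pyRange_one 1 (edge+1), PySem.List.pyRange_one 0 edge]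
  simp only [List.map_map]
  have hN : (edge + 1 - 1).toNat = (edge - 0).toNat := by omega
  rw [hN]
  apply List.map_congr_left
  intro k hk
  simp only [List.mem_range] at hk
  simp only [Function.comp_apply]
  by_cases hc : ((0:Int) + (k:Int)) = 0 ∨ ((0:Int) + (k:Int)) = edge - 1
  · rw [if_pos hc]
    apply List.ext_getElem
    · simp only [List.length_map, List.length_range, List.length_replicate]; omega
    · intro j h1 h2
      simp only [List.getElem_map, List.getElem_range, Function.comp_apply, List.getElem_replicate]
      simp only [List.length_map, List.length_range] at h1
      split_ifs with h
      · rfl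
      · exact absurd (by omega) h
  · rw [if_neg hc]
    have e1 : PySem.List.pySetD (List.replicate edge.toNat "   ") 0 " * "
        = (List.replicate edge.toNat "   ").set (0:Int).toNat " * " :=
      by apply PySem.List.pySetD_of_nonneg; omega
    rw [e1]
    have e2 : PySem.List.pySetD ((List.replicate edge.toNat "   ").set (0:Int).toNat " * ") (0 + (k:Int)) " * "
        = ((List.replicate edge.toNat "   ").set (0:Int).toNat " * ").set ((0:Int) + (k:Int)).toNat " * " :=
      by apply PySem.List.pySetD_of_nonneg; omega
    rw [e2]
    have e3 : PySem.List.pySetD (((List.replicate edge.toNat "   ").set (0:Int).toNat " * ").set ((0:Int) + (k:Int)).toNat " * ") (edge - 1 - (0 + (k:Int))) " * "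
        = (((List.replicate edge.toNat "   ").set (0:Int).toNat " * ").set ((0:Int) + (k:Int)).toNat " * ").set (edge - 1 - (0 + (k:Int))).toNat " * " :=
      by apply PySem.List.pySetD_of_nonneg; omega
    rw [e3]
    have e4 : PySem.List.pySetD ((((List.replicate edge.toNat "   ").set (0:Int).toNat " * ").set ((0:Int) + (k:Int)).toNat " * ").set (edge - 1 - (0 + (k:Int))).toNat " * ") (edge - 1) " * "
        = (((((List.replicate edge.toNat "   ").set (0:Int).toNat " * ").set ((0:Int) + (k:Int)).toNat " * ").set (edge - 1 - (0 + (k:Int))).toNat " * ")).set (edge - 1).toNat " * " :=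
      by apply PySem.List.pySetD_of_nonneg; omega
    rw [e4]
    apply List.ext_getElem
    · simp only [List.length_map, List.length_range, List.length_set, List.length_replicate]; omega
    · intro j h1 h2
      simp only [List.length_map, List.length_range] at h1
      simp only [List.length_set, List.length_replicate] at h2
      simp only [List.getElem_map, List.getElem_range, Function.comp_apply, List.getElem_set,
        List.getElem_replicate]
      split_ifs <;> first | rfl | omega

-- ===== VERDICT (by name: the statement is the Claim_ definition above) =====
theorem draw_rect_spec : Claim_equal_draw_rect := by
  intro edge _
  unfold Spec_draw_rect
  exact pv_main edge
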